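-- pv_equiv track=rewrite | github.com/remotelockbox/constraint | main.py | __count_indent
-- ===== SOURCE A (Python) =====
-- def __count_indent(msg):
--     indent = ''
--     for c in msg:
--         if c in [' ', '-']:
--             indent += ' '
--         else:
--             break
--     return indent
-- ===== SOURCE B (Python) =====
-- def __count_indent(msg):
--     return ' ' * (len(msg) - len(msg.lstrip(' -')))
-- ===== Notes on version B (the rewrite author's own statement) =====
-- stated objective: idiomatic
-- what changed: B replaces the explicit per-character loop with string accumulation by a str.lstrip call (strip set: space and dash) to measure the prefix length, then one string multiplication.
import Mathlib
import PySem

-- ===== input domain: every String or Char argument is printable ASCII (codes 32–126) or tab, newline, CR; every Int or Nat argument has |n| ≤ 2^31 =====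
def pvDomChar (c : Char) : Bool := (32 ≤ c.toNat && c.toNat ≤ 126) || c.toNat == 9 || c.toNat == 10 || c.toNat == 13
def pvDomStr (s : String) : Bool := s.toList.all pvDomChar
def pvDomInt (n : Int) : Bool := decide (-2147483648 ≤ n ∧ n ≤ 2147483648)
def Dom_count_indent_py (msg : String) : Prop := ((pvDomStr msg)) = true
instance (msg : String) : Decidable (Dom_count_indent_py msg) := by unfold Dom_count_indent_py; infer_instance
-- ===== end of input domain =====

-- B replaces A's per-character accumulation loop with lstrip(' -') + a length difference (idiomatic rewrite).

-- ===== PORT A =====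
-- loop over the characters, appending ' ' to the accumulator until a non-{' ','-'} char breaks
def count_indent_py_go : List Char → String → String
  | [], indent => indent
  | c :: cs, indent =>
      if c == ' ' || c == '-' then count_indent_py_go cs (indent ++ " ")
      else indent

def count_indent_py (msg : String) : String :=
  count_indent_py_go msg.toList ""

-- ===== PORT B =====
-- msg.lstrip(' -') drops the leading chars in {' ','-'}: ported exactly as dropWhile on the char list
def count_indent_py_alt (msg : String) : String :=
  let stripped := msg.toList.dropWhile (fun c => c == ' ' || c == '-')
  String.ofList (List.replicate (msg.toList.length - stripped.length) ' ')

-- ===== PRECONDITION & SPEC =====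
def Spec_count_indent_py (msg : String) (out : String) : Prop := out = count_indent_py_alt msg
instance (msg : String) (out : String) : Decidable (Spec_count_indent_py msg out) := by unfold Spec_count_indent_py; infer_instance

-- ===== CLAIM (what is proved, stated in full; the proofs are below) =====
def Claim_equal_count_indent_py : Prop := ∀ (msg : String), Dom_count_indent_py msg → Spec_count_indent_py msg (count_indent_py msg)

-- ===== LEMMAS AND PROOFS =====
lemma count_indent_py_go_eq (l : List Char) (ind : String) :
    count_indent_py_go l ind
      = ind ++ String.ofList (List.replicate (l.takeWhile (fun c => c == ' ' || c == '-')).length ' ') := by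
  induction l generalizing ind with
  | nil => simp [count_indent_py_go]
  | cons c cs ih =>
      rw [count_indent_py_go]
      by_cases h : (c == ' ' || c == '-') = true
      · rw [if_pos h, ih, List.takeWhile_cons, h]
        apply String.toList_inj.mp
        simp [List.replicate_succ]
      · rw [if_neg h, List.takeWhile_cons, Bool.of_not_eq_true h]
        simp

-- ===== VERDICT (by name: the statement is the Claim_ definition above) =====
theorem count_indent_py_spec : Claim_equal_count_indent_py := by
  intro msg _
  show count_indent_py msg = count_indent_py_alt msg
  unfold count_indent_py count_indent_py_alt
  rw [count_indent_py_go_eq]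
  have h := List.takeWhile_append_dropWhile (p := fun c => c == ' ' || c == '-') (l := msg.toList)
  have hlen : msg.toList.length
      = (msg.toList.takeWhile (fun c => c == ' ' || c == '-')).length
        + (msg.toList.dropWhile (fun c => c == ' ' || c == '-')).length := by
    conv_lhs => rw [← h]
    exact List.length_append
  simp [hlen]
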